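-- pv_equiv track=rewrite | github.com/gamamoe/ace-the-coding-interviews | Seungwoon/bookStudy/04_testExam.py | solution
-- ===== SOURCE A (Python) =====
-- def solution(answers):
--     l1 = [1, 2, 3, 4, 5] * len(answers) # 부족하지않게끔 길이 늘림
--     l2 = [2,1,2,3,2,4,2,5] * len(answers)
--     l3 = [3,3,1,1,2,2,4,4,5,5] * len(answers)
--     count = [0, 0, 0] # 점수 계산
--     for i in range(len(answers)):
--         if l1[i] == answers[i]:
--             count[0] += 1
--         if l2[i] == answers[i]:
--             count[1] += 1
--         if l3[i] == answers[i]: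
--             count[2] += 1
--     result = []
--     max_score = max(count)   # 미리 최댓값 계산
--     for idx, v in enumerate(count):
--         if max_score == v: # 최댓값과 같으면
--             result.append(idx + 1) # 해당 인덱스 추가
--
--     return result
-- ===== SOURCE B (Python) =====
-- def solution(answers):
--     # The three patterns all have periods (5, 8, 10) dividing 40, so positions are
--     # bucketed by residue mod 40: one histogram pass over (i % 40, answer) pairs,
--     # then each student's score is a sum of 40 dictionary lookups.
--     freq = {}
--     for i, a in enumerate(answers):
--         key = (i % 40, a)
--         freq[key] = freq.get(key, 0) + 1
--     patterns = [[1, 2, 3, 4, 5],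
--                 [2, 1, 2, 3, 2, 4, 2, 5],
--                 [3, 3, 1, 1, 2, 2, 4, 4, 5, 5]]
--     count = [sum(freq.get((r, p[r % len(p)]), 0) for r in range(40)) for p in patterns]
--     m = max(count)
--     return [k + 1 for k, v in enumerate(count) if v == m]
-- ===== Notes on version B (the rewrite author's own statement) =====
-- stated objective: alternative
-- what changed: Instead of tiling the three patterns to full length and comparing position by position, B buckets positions by residue mod 40 (the common period of the patterns) into one (residue, answer) histogram dict and computes each student's score as a sum of 40 histogram lookups.
import Mathlib
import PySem

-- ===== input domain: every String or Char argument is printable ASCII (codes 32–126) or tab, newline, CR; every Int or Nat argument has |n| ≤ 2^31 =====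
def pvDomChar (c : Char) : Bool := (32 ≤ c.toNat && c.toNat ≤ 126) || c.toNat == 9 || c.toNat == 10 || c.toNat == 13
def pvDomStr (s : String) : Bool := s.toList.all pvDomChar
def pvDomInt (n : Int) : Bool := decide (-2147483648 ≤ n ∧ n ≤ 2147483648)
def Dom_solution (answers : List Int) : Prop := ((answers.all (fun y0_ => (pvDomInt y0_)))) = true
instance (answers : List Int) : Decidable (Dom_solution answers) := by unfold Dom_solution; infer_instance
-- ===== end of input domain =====

-- B replaces tiled pattern lists compared position by position with a (residue mod 40,
-- answer) histogram dict; each score is then a sum of 40 histogram lookups (objective: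
-- alternative — same O(n) cost, a different counting structure).

-- ===== PORT A =====
def solution (answers : List Int) : List Int :=
  let n : Int := (answers.length : Int)
  let l1 := PySem.List.pyRepeat [1, 2, 3, 4, 5] n
  let l2 := PySem.List.pyRepeat [2, 1, 2, 3, 2, 4, 2, 5] n
  let l3 := PySem.List.pyRepeat [3, 3, 1, 1, 2, 2, 4, 4, 5, 5] n
  -- the three independent 'count[k] += 1' updates of the loop body; every index is in
  -- range (i < n ≤ len(lk)), so pyGetD's default 0 is never read and Python never raises
  let count :=
    (PySem.List.pyRange 0 n).foldl
      (fun (c : Int × Int × Int) i =>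
        (if PySem.List.pyGetD l1 i 0 = PySem.List.pyGetD answers i 0 then c.1 + 1 else c.1,
         if PySem.List.pyGetD l2 i 0 = PySem.List.pyGetD answers i 0 then c.2.1 + 1 else c.2.1,
         if PySem.List.pyGetD l3 i 0 = PySem.List.pyGetD answers i 0 then c.2.2 + 1 else c.2.2))
      (0, 0, 0)
  let countL : List Int := [count.1, count.2.1, count.2.2]
  -- max(count): countL is nonempty, so max? is some and the default 0 is never read
  let maxScore := (PySem.List.max? countL (fun x => x)).getD 0
  (PySem.List.enumerate countL).foldl
    (fun res iv => if maxScore = iv.2 then res ++ [iv.1 + 1] else res) []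

-- ===== PORT B =====
-- the histogram loop: freq[(i % 40, a)] = freq.get((i % 40, a), 0) + 1
def pvFreq (answers : List Int) : PySem.Dict (Int × Int) Int :=
  (PySem.List.enumerate answers).foldl
    (fun d ia =>
      d.insert (PySem.Int.mod ia.1 40, ia.2) (d.getD (PySem.Int.mod ia.1 40, ia.2) 0 + 1))
    PySem.Dict.empty

-- sum(freq.get((r, p[r % len(p)]), 0) for r in range(40)); r % len(p) is in range,
-- so pyGetD's default 0 is never read
def pvBucketScore (freq : PySem.Dict (Int × Int) Int) (p : List Int) : Int :=
  ((PySem.List.pyRange 0 40).map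
    (fun r => freq.getD (r, PySem.List.pyGetD p (PySem.Int.mod r (p.length : Int)) 0) 0)).sum

def solution_alt (answers : List Int) : List Int :=
  let freq := pvFreq answers
  let patterns : List (List Int) :=
    [[1, 2, 3, 4, 5], [2, 1, 2, 3, 2, 4, 2, 5], [3, 3, 1, 1, 2, 2, 4, 4, 5, 5]]
  let count := patterns.map (fun p => pvBucketScore freq p)
  -- max(count): count is nonempty, so max? is some and the default 0 is never read
  let m := (PySem.List.max? count (fun x => x)).getD 0
  ((PySem.List.enumerate count).filter (fun iv => iv.2 == m)).map (fun iv => iv.1 + 1)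

-- ===== PRECONDITION & SPEC =====
def Spec_solution (answers : List Int) (out : List Int) : Prop := out = solution_alt answers
instance (answers : List Int) (out : List Int) : Decidable (Spec_solution answers out) := by unfold Spec_solution; infer_instance

-- ===== CLAIM (what is proved, stated in full; the proofs are below) =====
def Claim_equal_solution : Prop := ∀ (answers : List Int), Dom_solution answers → Spec_solution answers (solution answers)

-- ===== LEMMAS AND PROOFS =====

-- common middle form: the number of positions where pattern p (read mod its length)
-- matches the answer
def pvScore (p : List Int) (answers : List Int) : Int :=
  ((PySem.List.enumerate answers).countP
    (fun ia => PySem.List.pyGetD p (PySem.Int.mod ia.1 (p.length : Int)) 0 == ia.2) : Int)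

-- indexing into the repeated list is modulo indexing into the pattern
lemma pvFlatten_replicate_getD (p : List Int) (hp : p ≠ []) :
    ∀ (n k : Nat), k < n * p.length →
      ((List.replicate n p).flatten).getD k 0 = p.getD (k % p.length) 0 := by
  intro n
  induction n with
  | zero => intro k hk; omega
  | succ m ih =>
    intro k hk
    by_cases h : k < p.length
    · rw [List.replicate_succ, List.flatten_cons, List.getD_append _ _ _ _ h,
        Nat.mod_eq_of_lt h]
    · have hlen : 0 < p.length := List.length_pos_iff.mpr hp
      rw [List.replicate_succ, List.flatten_cons, List.getD_append_right _ _ _ _ (by omega)]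
      rw [ih (k - p.length) (by rw [Nat.succ_mul] at hk; omega)]
      congr 1
      exact (Nat.mod_eq_sub_mod (by omega)).symm

-- A's per-pattern count over indices equals pvScore
lemma pvScoreA_eq (p : List Int) (hp : p ≠ []) (answers : List Int) :
    (PySem.List.pyRange 0 (answers.length : Int)).foldl
      (fun (acc : Int) i =>
        if PySem.List.pyGetD (PySem.List.pyRepeat p (answers.length : Int)) i 0
            = PySem.List.pyGetD answers i 0 then acc + 1 else acc) 0
    = pvScore p answers := by
  have hlen : 0 < p.length := List.length_pos_iff.mpr hp
  have hl : PySem.List.len answers = (answers.length : Int) := by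
    simp [PySem.List.len]
  rw [PySem.List.foldl_ite_add_one, pvScore,
    PySem.List.enumerate_eq_map_pyRange (d := 0), List.countP_map, hl, zero_add]
  congr 1
  apply List.countP_congr
  intro j hj
  rcases (PySem.List.mem_pyRange_one).mp hj with ⟨h0, hn⟩
  obtain ⟨k, rfl⟩ : ∃ k : Nat, j = (k : Int) := ⟨j.toNat, (Int.toNat_of_nonneg h0).symm⟩
  have hkn : k < answers.length := by exact_mod_cast hn
  have hrep : PySem.List.pyGetD (PySem.List.pyRepeat p (answers.length : Int)) (k : Int) 0
      = PySem.List.pyGetD p (PySem.Int.mod (k : Int) (p.length : Int)) 0 := by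
    rw [PySem.Int.mod_natCast, PySem.List.pyGetD_natCast, PySem.List.pyGetD_natCast,
      PySem.List.pyRepeat]
    have h2 : ((answers.length : Int)).toNat = answers.length := by simp
    rw [h2]
    exact pvFlatten_replicate_getD p hp answers.length k
      (lt_of_lt_of_le hkn (Nat.le_mul_of_pos_right _ hlen))
  simp only [Function.comp_def, hrep]
  simp

-- summing 0/1 indicators of 'this element equals (r, g r)' over a duplicate-free list
-- containing x.1 picks out whether x matches its own residue's value
lemma pvSum_indicator (R : List Int) (hnd : R.Nodup) (g : Int → Int) (x : Int × Int)
    (hx : x.1 ∈ R) :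
    (R.map (fun r => if ((r, g r) : Int × Int) == x then (1 : Int) else 0)).sum
      = if g x.1 == x.2 then (1 : Int) else 0 := by
  rw [PySem.List.sum_map_ite_one_zero]
  by_cases h : g x.1 = x.2
  · have hc : R.countP (fun r => ((r, g r) : Int × Int) == x) = 1 := by
      have he : R.countP (fun r => ((r, g r) : Int × Int) == x) = R.count x.1 := by
        apply List.countP_congr
        intro r _
        simp only [beq_iff_eq]
        constructor
        · intro hrr; rw [← hrr]
        · intro hrr; subst hrr; rw [Prod.ext_iff]; exact ⟨rfl, h⟩
      rw [he, List.count_eq_one_of_mem hnd hx]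
    simp [hc, h]
  · have hc : R.countP (fun r => ((r, g r) : Int × Int) == x) = 0 := by
      rw [List.countP_eq_zero]
      intro r _
      simp only [beq_iff_eq]
      intro he
      subst he
      exact h rfl
    simp [hc, h]

-- sum over a duplicate-free residue list of per-bucket counts = one global countP
lemma pvSum_count (R : List Int) (hnd : R.Nodup) (g : Int → Int) :
    ∀ (m : List (Int × Int)), (∀ x ∈ m, x.1 ∈ R) →
      (R.map (fun r => (m.count ((r, g r)) : Int))).sum
        = (m.countP (fun x => g x.1 == x.2) : Int) := by
  intro m
  induction m with
  | nil => intro _; simp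
  | cons x m' ih =>
    intro hmem
    have hx := hmem x (List.mem_cons_self)
    have h1 : (R.map (fun r => ((x :: m').count ((r, g r)) : Int)))
        = R.map (fun r => (m'.count ((r, g r)) : Int)
            + if ((r, g r) : Int × Int) == x then 1 else 0) := by
      apply List.map_congr_left
      intro r _
      rw [List.count_cons]
      by_cases h : ((r, g r) : Int × Int) = x
      · simp [h]
      · simp [beq_eq_false_iff_ne.mpr h, beq_eq_false_iff_ne.mpr (Ne.symm h)]
    rw [h1, PySem.List.sum_map_add_int, ih (fun y hy => hmem y (List.mem_cons_of_mem _ hy)),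
      pvSum_indicator R hnd g x hx, List.countP_cons]
    by_cases h : g x.1 = x.2
    · simp [h]
    · simp [h]

-- the histogram lookup is a count over the keyed list
lemma pvFreq_getD (answers : List Int) (v : Int × Int) :
    (pvFreq answers).getD v 0
      = (((PySem.List.enumerate answers).map
            (fun ia => ((PySem.Int.mod ia.1 40, ia.2) : Int × Int))).count v : Int) := by
  have hfold : pvFreq answers
      = (((PySem.List.enumerate answers).map
            (fun ia => ((PySem.Int.mod ia.1 40, ia.2) : Int × Int))).foldl
          (fun d k => d.insert k (d.getD k 0 + 1)) PySem.Dict.empty) := by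
    rw [pvFreq]
    exact (List.foldl_map
      (f := fun ia : Int × Int => ((PySem.Int.mod ia.1 40, ia.2) : Int × Int))
      (g := fun (d : PySem.Dict (Int × Int) Int) k => d.insert k (d.getD k 0 + 1))).symm
  rw [hfold, PySem.Dict.getD_foldl_insert_add_one]
  simp [PySem.Dict.empty, PySem.Dict.getD, PySem.Dict.get?]

-- B's per-pattern bucket sum equals pvScore (the pattern length divides 40)
lemma pvScoreB_eq (p : List Int) (hp : p ≠ []) (hdvd : ((p.length : Int)) ∣ 40)
    (answers : List Int) :
    pvBucketScore (pvFreq answers) p = pvScore p answers := by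
  have hlen : 0 < p.length := List.length_pos_iff.mpr hp
  have hmem : ∀ x ∈ (PySem.List.enumerate answers).map
      (fun ia => ((PySem.Int.mod ia.1 40, ia.2) : Int × Int)),
      x.1 ∈ PySem.List.pyRange 0 40 := by
    intro x hx
    rcases List.mem_map.mp hx with ⟨ia, hia, rfl⟩
    rw [PySem.List.mem_pyRange_one]
    exact ⟨PySem.Int.mod_nonneg _ (by norm_num), PySem.Int.mod_lt _ (by norm_num)⟩
  rw [pvBucketScore]
  have h1 : ((PySem.List.pyRange 0 40).map
      (fun r => (pvFreq answers).getD
        (r, PySem.List.pyGetD p (PySem.Int.mod r (p.length : Int)) 0) 0))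
      = (PySem.List.pyRange 0 40).map
        (fun r => (((PySem.List.enumerate answers).map
            (fun ia => ((PySem.Int.mod ia.1 40, ia.2) : Int × Int))).count
              ((r, PySem.List.pyGetD p (PySem.Int.mod r (p.length : Int)) 0)) : Int)) := by
    apply List.map_congr_left
    intro r _
    rw [pvFreq_getD]
  rw [h1, pvSum_count (PySem.List.pyRange 0 40) (PySem.List.nodup_pyRange_one 0 40)
      (fun r => PySem.List.pyGetD p (PySem.Int.mod r (p.length : Int)) 0) _ hmem,
    pvScore, List.countP_map]
  congr 1
  apply List.countP_congr
  intro ia hia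
  rcases (PySem.List.mem_enumerate_iff _ _ _).mp hia with ⟨k, hk, rfl⟩
  simp only [Function.comp_def]
  have hm1 : PySem.Int.mod (PySem.Int.mod ((0 : Int) + k) 40) (p.length : Int)
      = PySem.Int.mod ((0 : Int) + k) (p.length : Int) := by
    rw [PySem.Int.mod_eq_emod_of_pos (by norm_num : (0:Int) < 40),
      PySem.Int.mod_eq_emod_of_pos (by exact_mod_cast hlen : (0:Int) < (p.length : Int)),
      PySem.Int.mod_eq_emod_of_pos (by exact_mod_cast hlen : (0:Int) < (p.length : Int))]
    exact Int.emod_emod_of_dvd _ hdvd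
  rw [hm1]

-- the two result-building passes agree on any count list
lemma pvResult_eq (cs : List Int) (m : Int) :
    (PySem.List.enumerate cs).foldl
      (fun res iv => if m = iv.2 then res ++ [iv.1 + 1] else res) []
    = ((PySem.List.enumerate cs).filter (fun iv => iv.2 == m)).map (fun iv => iv.1 + 1) := by
  rw [PySem.List.foldl_append_ite (p := fun iv : Int × Int => m = iv.2)
      (f := fun iv : Int × Int => iv.1 + 1), List.nil_append]
  congr 1
  apply List.filter_congr
  intro iv _
  by_cases h : m = iv.2
  · subst h; simp
  · simp only [h, decide_false]
    exact (beq_eq_false_iff_ne.mpr (fun hc => h hc.symm)).symm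

-- ===== VERDICT (by name: the statement is the Claim_ definition above) =====
theorem solution_spec : Claim_equal_solution := by
  intro answers _
  show solution answers = solution_alt answers
  simp only [solution, solution_alt]
  rw [PySem.List.foldl_prod_mk
    (f := fun (acc : Int) i =>
      if PySem.List.pyGetD (PySem.List.pyRepeat [1, 2, 3, 4, 5] (answers.length : Int)) i 0
          = PySem.List.pyGetD answers i 0 then acc + 1 else acc)
    (g := fun (c : Int × Int) i =>
      (if PySem.List.pyGetD (PySem.List.pyRepeat [2, 1, 2, 3, 2, 4, 2, 5] (answers.length : Int)) i 0
          = PySem.List.pyGetD answers i 0 then c.1 + 1 else c.1,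
       if PySem.List.pyGetD (PySem.List.pyRepeat [3, 3, 1, 1, 2, 2, 4, 4, 5, 5] (answers.length : Int)) i 0
          = PySem.List.pyGetD answers i 0 then c.2 + 1 else c.2))]
  rw [PySem.List.foldl_prod_mk
    (f := fun (c1 : Int) i =>
      if PySem.List.pyGetD (PySem.List.pyRepeat [2, 1, 2, 3, 2, 4, 2, 5] (answers.length : Int)) i 0
          = PySem.List.pyGetD answers i 0 then c1 + 1 else c1)
    (g := fun (c2 : Int) i =>
      if PySem.List.pyGetD (PySem.List.pyRepeat [3, 3, 1, 1, 2, 2, 4, 4, 5, 5] (answers.length : Int)) i 0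
          = PySem.List.pyGetD answers i 0 then c2 + 1 else c2)]
  simp only [List.map_cons, List.map_nil]
  rw [pvScoreA_eq [1, 2, 3, 4, 5] (by simp) answers,
    pvScoreA_eq [2, 1, 2, 3, 2, 4, 2, 5] (by simp) answers,
    pvScoreA_eq [3, 3, 1, 1, 2, 2, 4, 4, 5, 5] (by simp) answers,
    pvScoreB_eq [1, 2, 3, 4, 5] (by simp) (by norm_num) answers,
    pvScoreB_eq [2, 1, 2, 3, 2, 4, 2, 5] (by simp) (by norm_num) answers,
    pvScoreB_eq [3, 3, 1, 1, 2, 2, 4, 4, 5, 5] (by simp) (by norm_num) answers,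
    pvResult_eq]
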